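-- pv_equiv track=rewrite | github.com/qml2code/qml2 | qml2/orb_ml/optimize_basis_sets.py | default_basis_rescaled_orbitals
-- ===== SOURCE A (Python) =====
-- def last_contracted_and_uncontracted_orbital_ids(basis_list):
--     encountered_momenta = []
--     last_contracted = []
--     uncontracted = []
--     en_basis_list = list(enumerate(basis_list))
--     for bo_id, bo in en_basis_list[::-1]:
--         if len(bo) == 2:
--             uncontracted.append(bo_id)
--             continue
--         momentum = bo[0]
--         if momentum not in encountered_momenta:
--             encountered_momenta.append(momentum)
--             last_contracted.append(bo_id)
--     return last_contracted, uncontracted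
--
-- def default_basis_rescaled_orbitals(basis):
--     """
--     Define a rescaling procedure that, for each element, assigns one rescaling factor
--     to the last contracted shell, and one rescaling factor corresponding to all
--     uncontracted shells at once.
--     """
--     rescaling_dictionnary = {}
--     for el, basis_list in basis.items():
--         rescaling_dictionnary[el] = []
--         for orb_list in last_contracted_and_uncontracted_orbital_ids(basis_list):
--             if orb_list:
--                 rescaling_dictionnary[el].append(orb_list)
--     return rescaling_dictionnary
-- ===== SOURCE B (Python) =====
-- def _last_contracted_and_uncontracted_fwd(basis_list):
--     contracted = []      # (orbital id, momentum), in increasing id order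
--     uncontracted = []
--     for i, bo in enumerate(basis_list):
--         if len(bo) == 2:
--             uncontracted.append(i)
--         else:
--             contracted.append((i, bo[0]))
--     momenta = [m for _, m in contracted]
--     last_contracted = [i for j, (i, m) in enumerate(contracted) if m not in momenta[j + 1:]]
--     return last_contracted[::-1], uncontracted[::-1]
--
--
-- def default_basis_rescaled_orbitals(basis):
--     """
--     Define a rescaling procedure that, for each element, assigns one rescaling factor
--     to the last contracted shell, and one rescaling factor corresponding to all
--     uncontracted shells at once.
--     """
--     return {el: [ids for ids in _last_contracted_and_uncontracted_fwd(basis_list) if ids]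
--             for el, basis_list in basis.items()}
-- ===== Notes on version B (the rewrite author's own statement) =====
-- stated objective: alternative
-- what changed: The helper now makes a single forward pass splitting enumerate(basis_list) into uncontracted ids and (id, momentum) pairs, picks the last shell per momentum by a suffix-membership comprehension instead of a reverse scan with an encountered-momenta accumulator, reverses both lists once at the end, and the outer function becomes a dict comprehension.
import Mathlib
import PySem

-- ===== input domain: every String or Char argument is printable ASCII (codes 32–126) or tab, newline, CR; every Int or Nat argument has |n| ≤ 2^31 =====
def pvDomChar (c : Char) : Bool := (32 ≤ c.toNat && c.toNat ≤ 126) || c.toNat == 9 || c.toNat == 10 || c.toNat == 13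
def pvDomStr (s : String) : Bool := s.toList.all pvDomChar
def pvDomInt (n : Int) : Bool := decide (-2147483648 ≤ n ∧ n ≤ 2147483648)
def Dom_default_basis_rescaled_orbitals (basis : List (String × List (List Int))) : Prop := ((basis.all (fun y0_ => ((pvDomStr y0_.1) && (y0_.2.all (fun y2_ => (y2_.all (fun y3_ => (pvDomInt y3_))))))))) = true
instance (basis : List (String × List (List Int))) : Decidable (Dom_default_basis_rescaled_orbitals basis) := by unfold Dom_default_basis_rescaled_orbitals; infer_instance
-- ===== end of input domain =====

-- B replaces the helper's reverse scan with encountered-momenta accumulator by a forward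
-- pass + suffix-membership comprehension + final reversals (alternative decomposition, not faster).

-- ===== PORT A =====
-- bo[0] (total form; Pre_ guarantees bo nonempty whenever this is evaluated)
def pvMom (bo : List Int) : Int := (PySem.List.pyGet? bo 0).getD 0

-- one step of A's loop over en_basis_list[::-1]; state = (encountered_momenta, last_contracted, uncontracted)
def pvAStep : (List Int × List Int × List Int) → (Int × List Int) → (List Int × List Int × List Int)
  | (enc, lc, unc), (i, bo) =>
    if bo.length = 2 then (enc, lc, unc ++ [i])
    else
      let m := pvMom bo
      if m ∈ enc then (enc, lc, unc) else (enc ++ [m], lc ++ [i], unc)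

def last_contracted_and_uncontracted_orbital_ids (basis_list : List (List Int)) : List Int × List Int :=
  let en := PySem.List.enumerate basis_list
  let rev := (PySem.List.slice? en none none (-1)).getD []
  let st := rev.foldl pvAStep ([], [], [])
  (st.2.1, st.2.2)

def default_basis_rescaled_orbitals (basis : List (String × List (List Int))) : List (String × List (List Int)) :=
  (basis.foldl (fun d p =>
      let orbs := last_contracted_and_uncontracted_orbital_ids p.2
      PySem.Dict.insert d p.1
        ([orbs.1, orbs.2].foldl (fun acc ol => if ol ≠ [] then acc ++ [ol] else acc) []))
    (PySem.Dict.empty : PySem.Dict String (List (List Int)))).items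

-- ===== PORT B =====
-- forward pass: split enumerate(basis_list) into (id, momentum) pairs and uncontracted ids
def pvBStep : (List (Int × Int) × List Int) → (Int × List Int) → (List (Int × Int) × List Int)
  | (c, u), (i, bo) =>
    if bo.length = 2 then (c, u ++ [i]) else (c ++ [(i, pvMom bo)], u)

-- [i for j, (i, m) in enumerate(contracted) if m not in momenta[j+1:]]
def pvFwdKeep : List (Int × Int) → List Int
  | [] => []
  | (i, m) :: r => if m ∈ r.map Prod.snd then pvFwdKeep r else i :: pvFwdKeep r

def pvLcauFwd (basis_list : List (List Int)) : List Int × List Int :=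
  let st := (PySem.List.enumerate basis_list).foldl pvBStep ([], [])
  ((pvFwdKeep st.1).reverse, st.2.reverse)

def default_basis_rescaled_orbitals_alt (basis : List (String × List (List Int))) : List (String × List (List Int)) :=
  (basis.foldl (fun d p =>
      let orbs := pvLcauFwd p.2
      PySem.Dict.insert d p.1 ([orbs.1, orbs.2].filter (fun ids => ids ≠ [])))
    (PySem.Dict.empty : PySem.Dict String (List (List Int)))).items

-- ===== PRECONDITION & SPEC =====
-- Pre_ excludes exactly the inputs on which Python A raises IndexError: a shell bo with
-- len(bo) != 2 and no entries makes the momentum lookup bo[0] raise.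
def Pre_default_basis_rescaled_orbitals (basis : List (String × List (List Int))) : Prop :=
  ∀ p ∈ basis, ∀ bo ∈ p.2, bo.length = 2 ∨ bo ≠ []
instance (basis : List (String × List (List Int))) : Decidable (Pre_default_basis_rescaled_orbitals basis) := by unfold Pre_default_basis_rescaled_orbitals; infer_instance

def pvWitness_default_basis_rescaled_orbitals : (List (String × List (List Int))) :=
  [("H", [[0, 1], [0, 2, 3], [1, 5], [0, 9, 9], [1, 2, 3], [2, 4]]), ("C", [[1, 2]])]

def Spec_default_basis_rescaled_orbitals (basis : List (String × List (List Int))) (out : List (String × List (List Int))) : Prop := out = default_basis_rescaled_orbitals_alt basis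
instance (basis : List (String × List (List Int))) (out : List (String × List (List Int))) : Decidable (Spec_default_basis_rescaled_orbitals basis out) := by unfold Spec_default_basis_rescaled_orbitals; infer_instance

-- ===== CLAIM (what is proved, stated in full; the proofs are below) =====
def Claim_equal_default_basis_rescaled_orbitals : Prop := ∀ (basis : List (String × List (List Int))), Dom_default_basis_rescaled_orbitals basis → Pre_default_basis_rescaled_orbitals basis → Spec_default_basis_rescaled_orbitals basis (default_basis_rescaled_orbitals basis)

-- ===== LEMMAS AND PROOFS =====

-- first-seen dedup along A's (already reversed) processing order
def pvDed : List (Int × List Int) → List Int → List Int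
  | [], _ => []
  | (i, bo) :: r, enc =>
    if bo.length = 2 then pvDed r enc
    else if pvMom bo ∈ enc then pvDed r enc
    else i :: pvDed r (pvMom bo :: enc)

-- dedup on the contracted (id, momentum) pairs only
def pvDed' : List (Int × Int) → List Int → List Int
  | [], _ => []
  | (i, k) :: r, enc => if k ∈ enc then pvDed' r enc else i :: pvDed' r (k :: enc)

-- pvKeepE generalizes pvFwdKeep with an extra "already seen" set
def pvKeepE : List (Int × Int) → List Int → List Int
  | [], _ => []
  | (i, k) :: r, enc => if k ∈ enc ∨ k ∈ r.map Prod.snd then pvKeepE r enc else i :: pvKeepE r enc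

def pvCSel (p : Int × List Int) : Option (Int × Int) :=
  if p.2.length = 2 then none else some (p.1, pvMom p.2)

theorem pvDed_congr : ∀ (m : List (Int × List Int)) (e1 e2 : List Int),
    (∀ k, k ∈ e1 ↔ k ∈ e2) → pvDed m e1 = pvDed m e2 := by
  intro m
  induction m with
  | nil => intro _ _ _; rfl
  | cons p r ih =>
    intro e1 e2 h
    obtain ⟨i, bo⟩ := p
    simp only [pvDed]
    by_cases h2 : bo.length = 2
    · rw [if_pos h2, if_pos h2]; exact ih e1 e2 h
    · rw [if_neg h2, if_neg h2]
      by_cases hk : pvMom bo ∈ e1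
      · rw [if_pos hk, if_pos ((h _).mp hk)]; exact ih e1 e2 h
      · rw [if_neg hk, if_neg (fun hc => hk ((h _).mpr hc))]
        have : ∀ k', k' ∈ pvMom bo :: e1 ↔ k' ∈ pvMom bo :: e2 := by
          intro k'; simp [List.mem_cons, h k']
        rw [ih _ _ this]

-- characterization of A's foldl
theorem pvA_fold : ∀ (m : List (Int × List Int)) (enc lc unc : List Int),
    (m.foldl pvAStep (enc, lc, unc)).2.1 = lc ++ pvDed m enc ∧
    (m.foldl pvAStep (enc, lc, unc)).2.2 = unc ++ (m.filter (fun p => decide (p.2.length = 2))).map Prod.fst := by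
  intro m
  induction m with
  | nil => intro enc lc unc; simp [pvDed]
  | cons p r ih =>
    intro enc lc unc
    obtain ⟨i, bo⟩ := p
    by_cases h2 : bo.length = 2
    · simp only [List.foldl_cons, pvAStep, if_pos h2, pvDed, List.filter_cons]
      rcases ih enc lc (unc ++ [i]) with ⟨h1, hu⟩
      refine ⟨by simpa [h2] using h1, ?_⟩
      simp [h2, hu]
    · by_cases hk : pvMom bo ∈ enc
      · simp only [List.foldl_cons, pvAStep, if_neg h2, if_pos hk, pvDed, List.filter_cons]
        rcases ih enc lc unc with ⟨h1, hu⟩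
        exact ⟨by simpa using h1, by simpa [h2] using hu⟩
      · simp only [List.foldl_cons, pvAStep, if_neg h2, if_neg hk, pvDed, List.filter_cons]
        rcases ih (enc ++ [pvMom bo]) (lc ++ [i]) unc with ⟨h1, hu⟩
        constructor
        · rw [h1, pvDed_congr r (enc ++ [pvMom bo]) (pvMom bo :: enc)
            (by intro k'; simp [List.mem_append, List.mem_cons, or_comm])]
          simp
        · simpa [h2] using hu
  
-- characterization of B's foldl
theorem pvB_fold : ∀ (m : List (Int × List Int)) (c : List (Int × Int)) (u : List Int),
    m.foldl pvBStep (c, u)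
      = (c ++ m.filterMap pvCSel, u ++ (m.filter (fun p => decide (p.2.length = 2))).map Prod.fst) := by
  intro m
  induction m with
  | nil => intro c u; simp
  | cons p r ih =>
    intro c u
    obtain ⟨i, bo⟩ := p
    by_cases h2 : bo.length = 2
    · simp only [List.foldl_cons, pvBStep, if_pos h2, List.filterMap_cons, List.filter_cons, pvCSel]
      rw [ih c (u ++ [i])]
      simp [h2, pvCSel]
    · simp only [List.foldl_cons, pvBStep, if_neg h2, List.filterMap_cons, List.filter_cons, pvCSel]
      rw [ih (c ++ [(i, pvMom bo)]) u]
      simp [h2, pvCSel]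

-- pvDed on full items = pvDed' on the contracted pairs
theorem pvDed_eq_ded' : ∀ (m : List (Int × List Int)) (enc : List Int),
    pvDed m enc = pvDed' (m.filterMap pvCSel) enc := by
  intro m
  induction m with
  | nil => intro enc; rfl
  | cons p r ih =>
    intro enc
    obtain ⟨i, bo⟩ := p
    by_cases h2 : bo.length = 2
    · simp [pvDed, pvCSel, h2, ih]
    · simp [pvDed, pvCSel, h2, pvDed', ih]

-- appending one pair at the end of pvDed''s input
theorem pvDed'_append_single : ∀ (m : List (Int × Int)) (i k : Int) (enc : List Int),
    pvDed' (m ++ [(i, k)]) enc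
      = pvDed' m enc ++ (if k ∈ enc ∨ k ∈ m.map Prod.snd then [] else [i]) := by
  intro m
  induction m with
  | nil =>
    intro i k enc
    by_cases hk : k ∈ enc <;> simp [pvDed', hk]
  | cons p r ih =>
    intro i k enc
    obtain ⟨i', k'⟩ := p
    by_cases hk' : k' ∈ enc
    · simp only [List.cons_append, pvDed', if_pos hk', ih]
      have : (k ∈ enc ∨ k ∈ r.map Prod.snd) ↔ (k ∈ enc ∨ k ∈ ((i', k') :: r).map Prod.snd) := by
        simp only [List.map_cons, List.mem_cons]
        constructor
        · tauto
        · rintro (h | h | h)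
          · exact Or.inl h
          · exact Or.inl (by simpa [h] using hk')
          · exact Or.inr h
      by_cases hc : k ∈ enc ∨ k ∈ r.map Prod.snd
      · rw [if_pos hc, if_pos (this.mp hc)]
      · rw [if_neg hc, if_neg (fun hc2 => hc (this.mpr hc2))]
    · simp only [List.cons_append, pvDed', if_neg hk', ih]
      have : (k ∈ k' :: enc ∨ k ∈ r.map Prod.snd) ↔ (k ∈ enc ∨ k ∈ ((i', k') :: r).map Prod.snd) := by
        simp only [List.map_cons, List.mem_cons]
        tauto
      by_cases hc : k ∈ k' :: enc ∨ k ∈ r.map Prod.snd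
      · rw [if_pos hc, if_pos (this.mp hc)]
      · rw [if_neg hc, if_neg (fun hc2 => hc (this.mpr hc2))]

theorem pvDed'_reverse : ∀ (c : List (Int × Int)) (enc : List Int),
    pvDed' c.reverse enc = (pvKeepE c enc).reverse := by
  intro c
  induction c with
  | nil => intro enc; rfl
  | cons p r ih =>
    intro enc
    obtain ⟨i, k⟩ := p
    have hrev : ((i, k) :: r).reverse = r.reverse ++ [(i, k)] := by simp
    rw [hrev, pvDed'_append_single, ih]
    have hmem : (k ∈ enc ∨ k ∈ r.reverse.map Prod.snd) ↔ (k ∈ enc ∨ k ∈ r.map Prod.snd) := by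
      simp [List.map_reverse]
    by_cases hc : k ∈ enc ∨ k ∈ r.map Prod.snd
    · rw [if_pos (hmem.mpr hc)]
      simp [pvKeepE, if_pos hc]
    · rw [if_neg (fun h => hc (hmem.mp h))]
      simp [pvKeepE, if_neg hc]

theorem pvKeepE_nil_seen : ∀ (c : List (Int × Int)), pvKeepE c [] = pvFwdKeep c := by
  intro c
  induction c with
  | nil => rfl
  | cons p r ih =>
    obtain ⟨i, k⟩ := p
    by_cases h : k ∈ r.map Prod.snd <;> simp [pvKeepE, pvFwdKeep, ih, h]

-- the two helpers agree
theorem pvInner_eq (bl : List (List Int)) :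
    last_contracted_and_uncontracted_orbital_ids bl = pvLcauFwd bl := by
  unfold last_contracted_and_uncontracted_orbital_ids pvLcauFwd
  simp only [PySem.List.slice?_none_none_neg_one, Option.getD_some, pvB_fold]
  rcases pvA_fold (PySem.List.enumerate bl).reverse [] [] [] with ⟨h1, h2⟩
  simp only [List.nil_append] at h1 h2
  refine Prod.ext ?_ ?_
  · show (List.foldl pvAStep ([], [], []) (PySem.List.enumerate bl).reverse).2.1 = _
    rw [h1, pvDed_eq_ded', List.filterMap_reverse, pvDed'_reverse, pvKeepE_nil_seen]
    simp
  · show (List.foldl pvAStep ([], [], []) (PySem.List.enumerate bl).reverse).2.2 = _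
    rw [h2, List.filter_reverse, List.map_reverse]
    simp

-- foldl append-if equals filter on the two-element list
theorem pvVal_eq (a b : List Int) :
    ([a, b].foldl (fun acc ol => if ol ≠ [] then acc ++ [ol] else acc) ([] : List (List Int)))
      = [a, b].filter (fun ids => ids ≠ []) := by
  by_cases ha : a = [] <;> by_cases hb : b = [] <;> simp [ha, hb]

-- ===== VERDICT (by name: the statement is the Claim_ definition above) =====
theorem default_basis_rescaled_orbitals_spec : Claim_equal_default_basis_rescaled_orbitals := by
  intro basis _ _
  show default_basis_rescaled_orbitals basis = default_basis_rescaled_orbitals_alt basis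
  unfold default_basis_rescaled_orbitals default_basis_rescaled_orbitals_alt
  congr 1
  apply PySem.List.foldl_congr_mem
  intro d p _
  rw [pvInner_eq]
  simp only [pvVal_eq]
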